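-- pv_equiv track=rewrite | github.com/yulishuta/algorithms-python | leecode8.2.py | startUnion
-- ===== SOURCE A (Python) =====
-- def startUnion(grid, m, n):
--     ids = {}
--
--     # 先合并行(这里可以优化)
--     for i in range(0, n):
--         preNum = -1
--         for j in range(0, m):
--             if grid[i][j] == 1:
--                 num = i*m + j
--                 # 和前面的union
--                 if preNum != -1:
--                     ids[preNum] = True
--                     ids[num] = True
--                 preNum = num
--
--     # 再合并列
--     for j in range(0, m):
--         preNum = -1
--         for i in range(0, n):
--             if grid[i][j] == 1:
--                 num = i*m + j
--                 if preNum != -1: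
--                     ids[preNum] = True
--                     ids[num] = True
--                 preNum = num
--
--     return ids
-- ===== SOURCE B (Python) =====
-- def startUnion(grid, m, n):
--     # Count the ones per row and per column, then keep a cell iff its row
--     # or its column contains at least two ones.
--     row_ones = [sum(1 for j in range(m) if grid[i][j] == 1) for i in range(n)]
--     col_ones = [sum(1 for i in range(n) if grid[i][j] == 1) for j in range(m)]
--     ids = {}
--     for i in range(n):
--         for j in range(m):
--             if grid[i][j] == 1 and row_ones[i] >= 2:
--                 ids[i*m + j] = True
--     for j in range(m):
--         for i in range(n):
--             if grid[i][j] == 1 and col_ones[j] >= 2: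
--                 ids[i*m + j] = True
--     return ids
-- ===== Notes on version B (the rewrite author's own statement) =====
-- stated objective: alternative
-- what changed: Replaces A's preNum adjacency-pairing state machine with precomputed per-row and per-column counts of ones and a simple 'count >= 2' threshold test per cell.
import Mathlib
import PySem

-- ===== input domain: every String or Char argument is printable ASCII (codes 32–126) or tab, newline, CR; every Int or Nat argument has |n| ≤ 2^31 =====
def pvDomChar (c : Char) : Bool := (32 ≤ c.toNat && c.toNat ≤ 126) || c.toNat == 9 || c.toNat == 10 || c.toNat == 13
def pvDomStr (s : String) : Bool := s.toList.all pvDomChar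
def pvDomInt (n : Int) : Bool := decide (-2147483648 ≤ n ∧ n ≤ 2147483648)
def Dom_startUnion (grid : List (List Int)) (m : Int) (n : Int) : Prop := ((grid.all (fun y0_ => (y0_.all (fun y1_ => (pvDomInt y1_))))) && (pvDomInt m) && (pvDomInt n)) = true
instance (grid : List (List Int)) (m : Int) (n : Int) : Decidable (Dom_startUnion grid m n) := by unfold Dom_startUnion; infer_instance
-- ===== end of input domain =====

-- B replaces A's preNum adjacency-pairing with precomputed per-row/per-column counts of ones
-- and a count ≥ 2 threshold test (objective: alternative, same asymptotic cost).

-- ===== PORT A =====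
def startUnion (grid : List (List Int)) (m : Int) (n : Int) : List (Int × Bool) :=
  let ids : PySem.Dict Int Bool := PySem.Dict.empty
  -- 先合并行
  let ids := (PySem.List.pyRange 0 n 1).foldl (fun ids i =>
    ((PySem.List.pyRange 0 m 1).foldl (fun (st : PySem.Dict Int Bool × Int) j =>
      if PySem.List.pyGetD (PySem.List.pyGetD grid i []) j 0 = 1 then
        if st.2 ≠ -1 then ((st.1.insert st.2 true).insert (i * m + j) true, i * m + j)
        else (st.1, i * m + j)
      else st) (ids, -1)).1) ids
  -- 再合并列
  let ids := (PySem.List.pyRange 0 m 1).foldl (fun ids j =>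
    ((PySem.List.pyRange 0 n 1).foldl (fun (st : PySem.Dict Int Bool × Int) i =>
      if PySem.List.pyGetD (PySem.List.pyGetD grid i []) j 0 = 1 then
        if st.2 ≠ -1 then ((st.1.insert st.2 true).insert (i * m + j) true, i * m + j)
        else (st.1, i * m + j)
      else st) (ids, -1)).1) ids
  ids.items

-- ===== PORT B =====
def startUnion_alt (grid : List (List Int)) (m : Int) (n : Int) : List (Int × Bool) :=
  let rowOnes : List Int := (PySem.List.pyRange 0 n 1).map (fun i =>
    (PySem.List.pyRange 0 m 1).foldl (fun acc j =>
      if PySem.List.pyGetD (PySem.List.pyGetD grid i []) j 0 = 1 then acc + 1 else acc) 0)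
  let colOnes : List Int := (PySem.List.pyRange 0 m 1).map (fun j =>
    (PySem.List.pyRange 0 n 1).foldl (fun acc i =>
      if PySem.List.pyGetD (PySem.List.pyGetD grid i []) j 0 = 1 then acc + 1 else acc) 0)
  let ids : PySem.Dict Int Bool := PySem.Dict.empty
  let ids := (PySem.List.pyRange 0 n 1).foldl (fun ids i =>
    (PySem.List.pyRange 0 m 1).foldl (fun (ids : PySem.Dict Int Bool) j =>
      if PySem.List.pyGetD (PySem.List.pyGetD grid i []) j 0 = 1 ∧ 2 ≤ PySem.List.pyGetD rowOnes i 0 then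
        ids.insert (i * m + j) true
      else ids) ids) ids
  let ids := (PySem.List.pyRange 0 m 1).foldl (fun ids j =>
    (PySem.List.pyRange 0 n 1).foldl (fun (ids : PySem.Dict Int Bool) i =>
      if PySem.List.pyGetD (PySem.List.pyGetD grid i []) j 0 = 1 ∧ 2 ≤ PySem.List.pyGetD colOnes j 0 then
        ids.insert (i * m + j) true
      else ids) ids) ids
  ids.items

-- ===== PRECONDITION & SPEC =====
-- Pre_ excludes exactly the inputs on which the Python raises IndexError: some visited
-- row index ≥ len(grid) or some visited column index ≥ len(grid[i]).
def Pre_startUnion (grid : List (List Int)) (m : Int) (n : Int) : Prop :=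
  n ≤ 0 ∨ m ≤ 0 ∨ (n ≤ (grid.length : Int) ∧ ∀ row ∈ grid.take n.toNat, m ≤ (row.length : Int))
instance (grid : List (List Int)) (m : Int) (n : Int) : Decidable (Pre_startUnion grid m n) := by
  unfold Pre_startUnion; infer_instance
def pvWitness_startUnion : List (List Int) × Int × Int := ([[1, 1], [0, 1]], 2, 2)
def Spec_startUnion (grid : List (List Int)) (m : Int) (n : Int) (out : List (Int × Bool)) : Prop := out = startUnion_alt grid m n
instance (grid : List (List Int)) (m : Int) (n : Int) (out : List (Int × Bool)) : Decidable (Spec_startUnion grid m n out) := by unfold Spec_startUnion; infer_instance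

-- ===== CLAIM (what is proved, stated in full; the proofs are below) =====
def Claim_equal_startUnion : Prop := ∀ (grid : List (List Int)) (m : Int) (n : Int), Dom_startUnion grid m n → Pre_startUnion grid m n → Spec_startUnion grid m n (startUnion grid m n)

-- ===== LEMMAS AND PROOFS =====


theorem pendA (P : Int → Prop) [DecidablePred P] (key : Int → Int) (L : List Int)
    (d : PySem.Dict Int Bool) (p : Int) (hp : p ≠ -1) (hk : ∀ x ∈ L, key x ≠ -1) :
    (L.foldl (fun (st : PySem.Dict Int Bool × Int) x =>
      if P x then
        if st.2 ≠ -1 then ((st.1.insert st.2 true).insert (key x) true, key x)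
        else (st.1, key x)
      else st) (d, p)).1
    = if (L.filter fun x => decide (P x)) = [] then d
      else (L.filter fun x => decide (P x)).foldl (fun d x => d.insert (key x) true) (d.insert p true) := by
  induction L generalizing d p with
  | nil => simp
  | cons x L ih =>
    by_cases hx : P x
    · have hkx : key x ≠ -1 := hk x (List.mem_cons_self)
      simp only [List.foldl_cons, List.filter_cons, hx, decide_true, if_pos, hp, ne_eq,
        not_false_iff]
      rw [ih _ _ hkx (fun y hy => hk y (List.mem_cons_of_mem _ hy))]
      rw [PySem.Dict.insert_insert_self]
      by_cases h : List.filter (fun x => decide (P x)) L = []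
      · simp [h]
      · simp [h]
    · simp only [List.foldl_cons, List.filter_cons, hx, decide_false, if_neg,
        Bool.false_eq_true, not_false_iff]
      exact ih d p hp (fun y hy => hk y (List.mem_cons_of_mem _ hy))

theorem rowA (P : Int → Prop) [DecidablePred P] (key : Int → Int) (L : List Int)
    (d : PySem.Dict Int Bool) (hk : ∀ x ∈ L, key x ≠ -1) :
    (L.foldl (fun (st : PySem.Dict Int Bool × Int) x =>
      if P x then
        if st.2 ≠ -1 then ((st.1.insert st.2 true).insert (key x) true, key x)
        else (st.1, key x)
      else st) (d, -1)).1
    = if 2 ≤ (L.filter fun x => decide (P x)).length then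
        (L.filter fun x => decide (P x)).foldl (fun d x => d.insert (key x) true) d
      else d := by
  induction L generalizing d with
  | nil => simp
  | cons x L ih =>
    by_cases hx : P x
    · have hkx : key x ≠ -1 := hk x (List.mem_cons_self)
      rw [List.foldl_cons]
      have hstep : (if P x then
            if ((d, (-1:Int)).2 ≠ -1) then
              (((d, (-1:Int)).1.insert (d, (-1:Int)).2 true).insert (key x) true, key x)
            else ((d, (-1:Int)).1, key x)
          else (d, (-1:Int))) = (d, key x) := by simp [hx]
      rw [hstep]
      rw [pendA P key L d (key x) hkx (fun y hy => hk y (List.mem_cons_of_mem _ hy))]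
      simp only [List.filter_cons, hx, decide_true, ite_true]
      by_cases h : List.filter (fun x => decide (P x)) L = []
      · simp [h]
      · have hlen : 1 ≤ (List.filter (fun x => decide (P x)) L).length :=
          List.length_pos_of_ne_nil h
        rw [if_neg h]
        rw [show (x :: List.filter (fun x => decide (P x)) L).length
            = (List.filter (fun x => decide (P x)) L).length + 1 from List.length_cons ..]
        rw [if_pos (by omega), List.foldl_cons]
    · simp only [List.foldl_cons, List.filter_cons, hx, decide_false, Bool.false_eq_true,
        if_neg, not_false_iff]
      exact ih d (fun y hy => hk y (List.mem_cons_of_mem _ hy))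

theorem rowB (P : Int → Prop) [DecidablePred P] (key : Int → Int) (L : List Int)
    (d : PySem.Dict Int Bool) (c : Int) (hc : c = ((L.filter fun x => decide (P x)).length : Int)) :
    (L.foldl (fun (d : PySem.Dict Int Bool) x =>
      if P x ∧ 2 ≤ c then d.insert (key x) true else d) d)
    = if 2 ≤ (L.filter fun x => decide (P x)).length then
        (L.filter fun x => decide (P x)).foldl (fun d x => d.insert (key x) true) d
      else d := by
  by_cases h2 : 2 ≤ (L.filter fun x => decide (P x)).length
  · rw [if_pos h2]
    have hcc : 2 ≤ c := by omega
    have : (L.foldl (fun (d : PySem.Dict Int Bool) x =>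
        if P x ∧ 2 ≤ c then d.insert (key x) true else d) d)
        = (L.foldl (fun (d : PySem.Dict Int Bool) x =>
        if P x then d.insert (key x) true else d) d) := by
      apply PySem.List.foldl_congr_mem
      intro acc x _
      by_cases hx : P x <;> simp [hx, hcc]
    rw [this, PySem.List.foldl_ite_eq_foldl_filter]
  · rw [if_neg h2]
    have hcc : ¬ 2 ≤ c := by omega
    have : (L.foldl (fun (d : PySem.Dict Int Bool) x =>
        if P x ∧ 2 ≤ c then d.insert (key x) true else d) d)
        = (L.foldl (fun (d : PySem.Dict Int Bool) _ => d) d) := by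
      apply PySem.List.foldl_congr_mem
      intro acc x _
      simp [hcc]
    rw [this, PySem.List.foldl_ignore]

-- One line (row or column): A's pass equals B's pass from any starting dict.
theorem line_eq (P : Int → Prop) [DecidablePred P] (key : Int → Int) (L : List Int)
    (d : PySem.Dict Int Bool) (c : Int) (hc : c = ((L.filter fun x => decide (P x)).length : Int))
    (hk : ∀ x ∈ L, key x ≠ -1) :
    (L.foldl (fun (st : PySem.Dict Int Bool × Int) x =>
      if P x then
        if st.2 ≠ -1 then ((st.1.insert st.2 true).insert (key x) true, key x)
        else (st.1, key x)
      else st) (d, -1)).1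
    = L.foldl (fun (d : PySem.Dict Int Bool) x =>
        if P x ∧ 2 ≤ c then d.insert (key x) true else d) d := by
  rw [rowA P key L d hk, rowB P key L d c hc]

-- ===== VERDICT (by name: the statement is the Claim_ definition above) =====
theorem startUnion_spec : Claim_equal_startUnion := by
  intro grid m n _ _
  unfold Spec_startUnion
  show startUnion grid m n = startUnion_alt grid m n
  simp only [startUnion, startUnion_alt]
  apply congrArg PySem.Dict.items
  have count_eq : ∀ (P : Int → Prop) (_ : DecidablePred P) (L : List Int),
      L.foldl (fun acc x => if P x then acc + 1 else acc) (0 : Int)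
        = (((L.filter fun x => decide (P x)).length : Nat) : Int) := by
    intro P hP L
    rw [PySem.List.foldl_ite_add_one P L 0, List.countP_eq_length_filter]
    ring
  have hrow : ∀ d : PySem.Dict Int Bool,
      (PySem.List.pyRange 0 n 1).foldl (fun ids i =>
        ((PySem.List.pyRange 0 m 1).foldl (fun (st : PySem.Dict Int Bool × Int) j =>
          if PySem.List.pyGetD (PySem.List.pyGetD grid i []) j 0 = 1 then
            if st.2 ≠ -1 then ((st.1.insert st.2 true).insert (i * m + j) true, i * m + j)
            else (st.1, i * m + j)
          else st) (ids, -1)).1) d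
      = (PySem.List.pyRange 0 n 1).foldl (fun ids i =>
        (PySem.List.pyRange 0 m 1).foldl (fun (ids : PySem.Dict Int Bool) j =>
          if PySem.List.pyGetD (PySem.List.pyGetD grid i []) j 0 = 1 ∧
              2 ≤ PySem.List.pyGetD ((PySem.List.pyRange 0 n 1).map (fun i =>
                (PySem.List.pyRange 0 m 1).foldl (fun acc j =>
                  if PySem.List.pyGetD (PySem.List.pyGetD grid i []) j 0 = 1 then acc + 1
                  else acc) (0 : Int))) i 0 then
            ids.insert (i * m + j) true
          else ids) ids) d := by
    intro d
    apply PySem.List.foldl_congr_mem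
    intro acc i hi
    obtain ⟨hi0, hin⟩ := (PySem.List.mem_pyRange_one ..).1 hi
    rw [PySem.List.pyGetD_map_pyRange_of_nonneg _ n i 0 hi0 hin]
    exact line_eq (fun j => PySem.List.pyGetD (PySem.List.pyGetD grid i []) j 0 = 1)
      (fun j => i * m + j) (PySem.List.pyRange 0 m 1) acc _
      (count_eq (fun j => PySem.List.pyGetD (PySem.List.pyGetD grid i []) j 0 = 1)
        inferInstance (PySem.List.pyRange 0 m 1))
      (fun j hj => by
        obtain ⟨hj0, hjm⟩ := (PySem.List.mem_pyRange_one ..).1 hj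
        have h2 : 0 ≤ i * m := mul_nonneg hi0 (by omega)
        show i * m + j ≠ -1
        omega)
  have hcol : ∀ d : PySem.Dict Int Bool,
      (PySem.List.pyRange 0 m 1).foldl (fun ids j =>
        ((PySem.List.pyRange 0 n 1).foldl (fun (st : PySem.Dict Int Bool × Int) i =>
          if PySem.List.pyGetD (PySem.List.pyGetD grid i []) j 0 = 1 then
            if st.2 ≠ -1 then ((st.1.insert st.2 true).insert (i * m + j) true, i * m + j)
            else (st.1, i * m + j)
          else st) (ids, -1)).1) d
      = (PySem.List.pyRange 0 m 1).foldl (fun ids j =>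
        (PySem.List.pyRange 0 n 1).foldl (fun (ids : PySem.Dict Int Bool) i =>
          if PySem.List.pyGetD (PySem.List.pyGetD grid i []) j 0 = 1 ∧
              2 ≤ PySem.List.pyGetD ((PySem.List.pyRange 0 m 1).map (fun j =>
                (PySem.List.pyRange 0 n 1).foldl (fun acc i =>
                  if PySem.List.pyGetD (PySem.List.pyGetD grid i []) j 0 = 1 then acc + 1
                  else acc) (0 : Int))) j 0 then
            ids.insert (i * m + j) true
          else ids) ids) d := by
    intro d
    apply PySem.List.foldl_congr_mem
    intro acc j hj
    obtain ⟨hj0, hjm⟩ := (PySem.List.mem_pyRange_one ..).1 hj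
    rw [PySem.List.pyGetD_map_pyRange_of_nonneg _ m j 0 hj0 hjm]
    exact line_eq (fun i => PySem.List.pyGetD (PySem.List.pyGetD grid i []) j 0 = 1)
      (fun i => i * m + j) (PySem.List.pyRange 0 n 1) acc _
      (count_eq (fun i => PySem.List.pyGetD (PySem.List.pyGetD grid i []) j 0 = 1)
        inferInstance (PySem.List.pyRange 0 n 1))
      (fun i hi => by
        obtain ⟨hi0, hin⟩ := (PySem.List.mem_pyRange_one ..).1 hi
        have h2 : 0 ≤ i * m := mul_nonneg hi0 (by omega)
        show i * m + j ≠ -1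
        omega)
  rw [hrow, hcol]
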